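-- pv_equiv track=rewrite | github.com/DomhnallBoyle/lip2speech-unit | multi_target_lip2speech/helpers.py | replace_repeated_indices
-- ===== SOURCE A (Python) =====
-- def replace_repeated_indices(indices):
--     # replace consecutive repeated tokens with blanks
--     indices = [int(x) for x in indices]
--
--     i = 0
--     new_indices = []
--     while i < len(indices) - 1:
--         if indices[i] == 0 or indices[i] != indices[i + 1]:
--             new_indices.append(indices[i])
--             i += 1
--             continue
--
--         repeated_token = indices[i]
--         new_indices.append(repeated_token)
--         for j in range(i + 1, len(indices)):
--             if indices[j] == repeated_token:
--                 new_indices.append(0)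
--             else:
--                 break
--
--         i = j
--
--     if len(new_indices) < len(indices):
--         new_indices.append(indices[-1])
--
--     assert len(new_indices) == len(indices)
--
--     return new_indices
-- ===== SOURCE B (Python) =====
-- def replace_repeated_indices(indices):
--     # replace consecutive repeated tokens with blanks: one forward pass tracking the previous value
--     indices = [int(x) for x in indices]
--     out = []
--     prev = None
--     for x in indices:
--         out.append(0 if prev is not None and x != 0 and x == prev else x)
--         prev = x
--     return out
-- ===== Notes on version B (the rewrite author's own statement) =====
-- stated objective: simpler
-- what changed: Replaces A's two-pointer run detection (outer while with an inner for scanning each run, plus a trailing-element fix-up append and a length assert) by a single forward pass that compares each element with the previous one.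
import Mathlib
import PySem

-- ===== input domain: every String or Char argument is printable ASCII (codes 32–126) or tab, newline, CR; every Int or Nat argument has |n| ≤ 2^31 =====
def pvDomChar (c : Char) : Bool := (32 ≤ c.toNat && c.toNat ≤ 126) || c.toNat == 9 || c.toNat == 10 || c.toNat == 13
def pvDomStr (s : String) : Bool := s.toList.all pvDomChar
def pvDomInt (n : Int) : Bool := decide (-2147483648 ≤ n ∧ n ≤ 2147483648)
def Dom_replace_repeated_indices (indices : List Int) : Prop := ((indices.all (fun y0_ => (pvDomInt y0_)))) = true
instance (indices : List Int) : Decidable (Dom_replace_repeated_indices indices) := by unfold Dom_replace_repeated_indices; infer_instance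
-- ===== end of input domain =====

-- B is a simpler single forward pass comparing each element with the previous one; return values proved equal on all inputs.

-- ===== PORT A =====
-- inner `for j in range(i+1, len(indices))` loop: appends 0 while indices[j] == repeated_token,
-- breaks at the first other token; returns (new acc, final value of j). Called only with j < n.
def aFor (xs : List Int) (tok : Int) (n : Nat) (j : Nat) (acc : List Int) (fuel : Nat) :
    List Int × Nat :=
  match fuel with
  | 0 => (acc, j)
  | fuel + 1 =>
    if xs.getD j 0 = tok then
      if j + 1 < n then aFor xs tok n (j + 1) (acc ++ [0]) fuel
      else (acc ++ [0], j)          -- range exhausted: j keeps its last value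
    else (acc, j)                    -- break

-- outer `while i < len(indices) - 1` loop (fuel = n is enough: i strictly increases)
def aWhile (xs : List Int) (n : Nat) (i : Nat) (acc : List Int) (fuel : Nat) : List Int :=
  match fuel with
  | 0 => acc
  | fuel + 1 =>
    if i < n - 1 then
      if xs.getD i 0 = 0 ∨ xs.getD i 0 ≠ xs.getD (i + 1) 0 then
        aWhile xs n (i + 1) (acc ++ [xs.getD i 0]) fuel
      else
        let p := aFor xs (xs.getD i 0) n (i + 1) (acc ++ [xs.getD i 0]) n
        aWhile xs n p.2 p.1 fuel
    else acc

def replace_repeated_indices (indices : List Int) : List Int :=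
  let indices := indices.map (fun x => x)   -- indices = [int(x) for x in indices]
  let r := aWhile indices indices.length 0 [] indices.length
  if r.length < indices.length then r ++ [(PySem.List.pyGet? indices (-1)).getD 0] else r
  -- the assert always holds; the trailing pyGet? (-1) is indices[-1], reached only when nonempty

-- ===== PORT B =====
def replace_repeated_indices_alt (indices : List Int) : List Int :=
  let ind := indices.map (fun x => x)       -- indices = [int(x) for x in indices]
  (ind.foldl
    (fun (s : List Int × Option Int) x =>
      (s.1 ++ [if s.2 ≠ none ∧ x ≠ 0 ∧ s.2 = some x then 0 else x], some x))
    ([], none)).1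

-- ===== PRECONDITION & SPEC =====
def Spec_replace_repeated_indices (indices : List Int) (out : List Int) : Prop := out = replace_repeated_indices_alt indices
instance (indices : List Int) (out : List Int) : Decidable (Spec_replace_repeated_indices indices out) := by unfold Spec_replace_repeated_indices; infer_instance

-- ===== CLAIM (what is proved, stated in full; the proofs are below) =====
def Claim_equal_replace_repeated_indices : Prop := ∀ (indices : List Int), Dom_replace_repeated_indices indices → Spec_replace_repeated_indices indices (replace_repeated_indices indices)

-- ===== LEMMAS AND PROOFS =====

-- reference form of the output suffix: `core p ys` maps each element to 0 iff nonzero and equal to the previous one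
def core (p : Int) (ys : List Int) : List Int :=
  match ys with
  | [] => []
  | x :: ys => (if x ≠ 0 ∧ x = p then 0 else x) :: core x ys

-- suffix of the intended output from position i (i < length): position i passes through
def D (xs : List Int) (i : Nat) : List Int :=
  xs.getD i 0 :: core (xs.getD i 0) (xs.drop (i + 1))

lemma getLast?_cons_ne {α : Type} (a : α) (l : List α) (h : l ≠ []) :
    (a :: l).getLast? = l.getLast? := by
  cases l with
  | nil => exact absurd rfl h
  | cons b m => exact List.getLast?_cons_cons

lemma getLast?_append_ne {α : Type} (l m : List α) (h : m ≠ []) :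
    (l ++ m).getLast? = m.getLast? := by
  induction l with
  | nil => rfl
  | cons a l ih =>
      rw [List.cons_append, getLast?_cons_ne _ _ (by simp [h]), ih]

lemma core_length (p : Int) (ys : List Int) : (core p ys).length = ys.length := by
  induction ys generalizing p with
  | nil => rfl
  | cons x ys ih => simp [core, ih]

lemma bLoop_core (ys : List Int) : ∀ (acc : List Int) (p : Int),
    (ys.foldl
      (fun (s : List Int × Option Int) x =>
        (s.1 ++ [if s.2 ≠ none ∧ x ≠ 0 ∧ s.2 = some x then 0 else x], some x))
      (acc, some p)).1 = acc ++ core p ys := by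
  induction ys with
  | nil => intro acc p; simp [core]
  | cons x ys ih =>
      intro acc p
      simp only [List.foldl_cons, core, ih]
      have hiff : (¬x = 0 ∧ p = x) ↔ (¬x = 0 ∧ x = p) := by
        constructor <;> rintro ⟨a, b⟩ <;> exact ⟨a, b.symm⟩
      simp [List.append_assoc, hiff]

lemma alt_eq_D (xs : List Int) (h : xs ≠ []) :
    replace_repeated_indices_alt xs = D xs 0 := by
  cases xs with
  | nil => exact absurd rfl h
  | cons x ys =>
      simp only [replace_repeated_indices_alt, List.map_id', List.foldl_cons]
      simp only [show (¬((none : Option Int) = none) ∧ x ≠ 0 ∧ (none : Option Int) = some x) = False by simp]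
      simp only [if_false, List.nil_append]
      rw [bLoop_core]
      simp [D]

-- acc-threading for aFor
lemma aFor_acc (xs : List Int) (tok : Int) (n : Nat) : ∀ (fuel j : Nat) (a b : List Int),
    aFor xs tok n j (a ++ b) fuel = (a ++ (aFor xs tok n j b fuel).1, (aFor xs tok n j b fuel).2) := by
  intro fuel
  induction fuel with
  | zero => intro j a b; rfl
  | succ fuel ih =>
      intro j a b
      simp only [aFor]
      split_ifs with h1 h2
      · rw [List.append_assoc, ih]
      · simp [List.append_assoc]
      · simp

-- acc-threading for aWhile
lemma aWhile_acc (xs : List Int) (n : Nat) : ∀ (fuel i : Nat) (acc : List Int),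
    aWhile xs n i acc fuel = acc ++ aWhile xs n i [] fuel := by
  intro fuel
  induction fuel with
  | zero => intro i acc; simp [aWhile]
  | succ fuel ih =>
      intro i acc
      simp only [aWhile]
      split_ifs with h1 h2
      · rw [ih (i + 1) (acc ++ [xs.getD i 0]), ih (i + 1) ([] ++ [xs.getD i 0])]
        simp
      · simp only [List.nil_append]
        rw [show acc ++ [xs.getD i 0] = acc ++ [xs.getD i 0] from rfl,
            aFor_acc xs (xs.getD i 0) n n (i + 1) acc [xs.getD i 0]]
        rw [ih, ih (aFor xs (xs.getD i 0) n (i + 1) [xs.getD i 0] n).2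
              (aFor xs (xs.getD i 0) n (i + 1) [xs.getD i 0] n).1]
        simp
      · simp

-- characterisation of aFor on a run (entered with get (j-1) = tok ≠ 0)
lemma aFor_run (xs : List Int) (tok : Int) (n : Nat) : ∀ (fuel j : Nat) (acc : List Int),
    j < n → n - j ≤ fuel →
    (∃ j', j ≤ j' ∧ j' < n ∧
        aFor xs tok n j acc fuel = (acc ++ List.replicate (j' - j) 0, j') ∧
        xs.getD j' 0 ≠ tok ∧ (∀ p, j ≤ p → p < j' → xs.getD p 0 = tok))
    ∨ (aFor xs tok n j acc fuel = (acc ++ List.replicate (n - j) 0, n - 1) ∧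
        (∀ p, j ≤ p → p < n → xs.getD p 0 = tok)) := by
  intro fuel
  induction fuel with
  | zero => intro j acc hj hf; omega
  | succ fuel ih =>
      intro j acc hj hf
      simp only [aFor]
      split_ifs with h1 h2
      · -- xs[j] = tok and j+1 < n : continue
        rcases ih (j + 1) (acc ++ [0]) h2 (by omega) with
          ⟨j', hj1, hj2, heq, hne, hall⟩ | ⟨heq, hall⟩
        · left
          refine ⟨j', by omega, hj2, ?_, hne, ?_⟩
          · rw [heq]
            have : List.replicate (j' - j) (0 : Int) = 0 :: List.replicate (j' - (j + 1)) 0 := by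
              have : j' - j = (j' - (j + 1)) + 1 := by omega
              rw [this, List.replicate_succ]
            rw [this]; simp
          · intro p hp1 hp2
            rcases Nat.eq_or_lt_of_le hp1 with h | h
            · exact h ▸ h1
            · exact hall p h hp2
        · right
          refine ⟨?_, ?_⟩
          · rw [heq]
            have : List.replicate (n - j) (0 : Int) = 0 :: List.replicate (n - (j + 1)) 0 := by
              have : n - j = (n - (j + 1)) + 1 := by omega
              rw [this, List.replicate_succ]
            rw [this]; simp
          · intro p hp1 hp2
            rcases Nat.eq_or_lt_of_le hp1 with h | h
            · exact h ▸ h1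
            · exact hall p h hp2
      · -- xs[j] = tok, range exhausted: j = n - 1
        right
        have hjn : j = n - 1 := by omega
        have : n - j = 1 := by omega
        rw [this]
        refine ⟨by simp [hjn], ?_⟩
        intro p hp1 hp2
        have : p = j := by omega
        exact this ▸ h1
      · -- break
        left
        exact ⟨j, le_refl j, hj, by simp, h1, fun p hp1 hp2 => absurd hp1 (by omega)⟩

-- core over a constant run of tok
lemma core_run (xs : List Int) (tok : Int) (htok : tok ≠ 0) : ∀ (k j : Nat),
    j + k ≤ xs.length → (∀ p, j ≤ p → p < j + k → xs.getD p 0 = tok) →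
    core tok (xs.drop j) = List.replicate k 0 ++ core tok (xs.drop (j + k)) := by
  intro k
  induction k with
  | zero => intro j _ _; simp
  | succ k ih =>
      intro j hlen hall
      have hj : j < xs.length := by omega
      rw [List.drop_eq_getElem_cons hj]
      have hx : xs[j] = tok := by
        have := hall j (le_refl j) (by omega)
        rwa [List.getD_eq_getElem _ _ hj] at this
      simp only [core, hx]
      rw [if_pos ⟨htok, trivial⟩]
      have := ih (j + 1) (by omega) (fun p hp1 hp2 => hall p (by omega) (by omega))
      rw [this]
      have : j + 1 + k = j + (k + 1) := by omega
      rw [this, List.replicate_succ]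
      simp

-- main loop lemma
lemma aWhile_spec (xs : List Int) : ∀ (fuel i : Nat),
    i < xs.length → xs.length - 1 - i < fuel →
    aWhile xs xs.length i [] fuel = D xs i
    ∨ (aWhile xs xs.length i [] fuel = (D xs i).dropLast
        ∧ (D xs i).getLast? = some (xs.getD (xs.length - 1) 0)) := by
  intro fuel
  induction fuel with
  | zero => intro i hi hf; omega
  | succ fuel ih =>
      intro i hi hf
      simp only [aWhile]
      by_cases h1 : i < xs.length - 1
      · rw [if_pos h1]
        have hi1 : i + 1 < xs.length := by omega
        have hdrop : xs.drop (i + 1) = xs.getD (i + 1) 0 :: xs.drop (i + 2) := by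
          rw [List.drop_eq_getElem_cons hi1, List.getD_eq_getElem _ _ hi1]
        by_cases h2 : xs.getD i 0 = 0 ∨ xs.getD i 0 ≠ xs.getD (i + 1) 0
        · rw [if_pos h2, aWhile_acc, List.nil_append]
          have hD : D xs i = xs.getD i 0 :: D xs (i + 1) := by
            simp only [D, hdrop, core]
            congr 1
            rw [if_neg]
            rintro ⟨ha, hb⟩
            rcases h2 with h | h
            · exact ha (hb.trans h)
            · exact h hb.symm
          rcases ih (i + 1) hi1 (by omega) with h | ⟨h, hlast⟩
          · left; rw [h, hD]; rfl
          · right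
            refine ⟨?_, ?_⟩
            · rw [h, hD, List.dropLast_cons_of_ne_nil (by simp [D])]; rfl
            · rw [hD, getLast?_cons_ne _ _ (by simp [D])]
              exact hlast
        · rw [if_neg h2]
          push Not at h2
          obtain ⟨hne0, heqn⟩ := h2
          simp only [List.nil_append]
          rcases aFor_run xs (xs.getD i 0) xs.length xs.length (i + 1) [xs.getD i 0]
              hi1 (by omega) with ⟨j', hj1, hj2, heq, hne, hall⟩ | ⟨heq, hall⟩
          · rw [heq]
            simp only []
            rw [aWhile_acc]
            have hall' : ∀ p, i + 1 ≤ p → p < (i + 1) + (j' - (i + 1)) → xs.getD p 0 = xs.getD i 0 := by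
              intro p hp1 hp2
              exact hall p hp1 (by omega)
            have hcore : core (xs.getD i 0) (xs.drop (i + 1)) =
                List.replicate (j' - (i + 1)) 0 ++ D xs j' := by
              rw [core_run xs (xs.getD i 0) hne0 (j' - (i + 1)) (i + 1) (by omega) hall']
              congr 1
              have hj'eq : (i + 1) + (j' - (i + 1)) = j' := by omega
              rw [hj'eq, List.drop_eq_getElem_cons hj2]
              simp only [core, D]
              rw [List.getD_eq_getElem _ _ hj2, if_neg]
              rintro ⟨_, hb⟩
              exact hne (by rw [List.getD_eq_getElem _ _ hj2]; exact hb)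
            have hD : D xs i = xs.getD i 0 :: (List.replicate (j' - (i + 1)) 0 ++ D xs j') := by
              simp only [D, hcore]
            rcases ih j' hj2 (by omega) with h | ⟨h, hlast⟩
            · left; rw [h, hD]; simp
            · right
              refine ⟨?_, ?_⟩
              · rw [h, hD, List.dropLast_cons_of_ne_nil (by simp [D]),
                    List.dropLast_append_of_ne_nil (by simp [D])]
                simp
              · rw [hD, getLast?_cons_ne _ _ (by simp [D]),
                    getLast?_append_ne _ _ (by simp [D])]
                exact hlast
          · rw [heq]
            simp only []
            have hstop : ∀ (f : Nat) (acc : List Int),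
                aWhile xs xs.length (xs.length - 1) acc f = acc := by
              intro f acc
              cases f <;> simp [aWhile]
            rw [hstop]
            left
            have hall' : ∀ p, i + 1 ≤ p → p < (i + 1) + (xs.length - (i + 1)) → xs.getD p 0 = xs.getD i 0 := by
              intro p hp1 hp2
              exact hall p hp1 (by omega)
            have hcore : core (xs.getD i 0) (xs.drop (i + 1)) =
                List.replicate (xs.length - (i + 1)) 0 := by
              rw [core_run xs (xs.getD i 0) hne0 (xs.length - (i + 1)) (i + 1) (by omega) hall']
              have : (i + 1) + (xs.length - (i + 1)) = xs.length := by omega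
              rw [this, List.drop_length]
              simp [core]
            simp only [D]
            rw [hcore]
            rfl
      · rw [if_neg h1]
        right
        have hieq : i = xs.length - 1 := by omega
        have hdropnil : xs.drop (i + 1) = [] := List.drop_eq_nil_of_le (by omega)
        have hD1 : D xs i = [xs.getD i 0] := by simp [D, hdropnil, core]
        refine ⟨by simp [hD1], ?_⟩
        rw [hD1, hieq]
        simp

-- ===== VERDICT (by name: the statement is the Claim_ definition above) =====
lemma length_D (xs : List Int) (h : xs ≠ []) : (D xs 0).length = xs.length := by
  simp only [D, List.length_cons, core_length, List.length_drop]
  cases xs with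
  | nil => exact absurd rfl h
  | cons x ys => simp

lemma last_getD (xs : List Int) :
    (PySem.List.pyGet? xs (-1)).getD 0 = xs.getD (xs.length - 1) 0 := by
  rw [PySem.List.pyGet?_neg_one, List.getLast?_eq_getElem?]
  rfl

theorem replace_repeated_indices_spec : Claim_equal_replace_repeated_indices := by
  intro xs _
  unfold Spec_replace_repeated_indices
  by_cases hne : xs = []
  · subst hne; rfl
  · have hpos : 0 < xs.length := List.length_pos_of_ne_nil hne
    simp only [replace_repeated_indices, List.map_id']
    rcases aWhile_spec xs xs.length 0 hpos (by omega) with h | ⟨h, hlast⟩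
    · rw [h, if_neg (by rw [length_D xs hne]; omega), alt_eq_D xs hne]
    · rw [h, if_pos (by rw [List.length_dropLast, length_D xs hne]; omega),
          alt_eq_D xs hne, last_getD xs]
      have hDne : D xs 0 ≠ [] := by simp [D]
      have hcat := List.dropLast_append_getLast hDne
      have h2 := List.getLast?_eq_some_getLast hDne
      rw [hlast] at h2
      simp only [Option.some_inj] at h2
      rw [h2]
      exact hcat
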